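-- pv_equiv track=rewrite | github.com/SauravSinha76/scaler2 | class39/count_pair.py | solve_brt
-- ===== SOURCE A (Python) =====
-- def solve_brt(A,B):
--     n = len(A)
--     m = len(B)
--     count =0
--     for i in range(n):
--         for j in range(m):
--             if A[i] > B[j]:
--                 count += 1
--     return count
-- ===== SOURCE B (Python) =====
-- def solve_brt(A, B):
--     # Sort B once; for each a in A, binary-search (bisect_left) the number of
--     # elements of B strictly below a.  O((n+m) log m) instead of O(n*m).
--     SB = sorted(B)
--     total = 0
--     for a in A:
--         lo, hi = 0, len(SB)
--         while lo < hi:          # bisect_left by hand (no imports in this module)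
--             mid = (lo + hi) // 2
--             if SB[mid] < a:
--                 lo = mid + 1
--             else:
--                 hi = mid
--         total += lo
--     return total
-- ===== Notes on version B (the rewrite author's own statement) =====
-- stated objective: faster
-- what changed: Replaces the nested scan over all (i,j) pairs by sorting B once and counting, for each a in A, the elements of B below a with a bisect_left binary search.
import Mathlib
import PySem

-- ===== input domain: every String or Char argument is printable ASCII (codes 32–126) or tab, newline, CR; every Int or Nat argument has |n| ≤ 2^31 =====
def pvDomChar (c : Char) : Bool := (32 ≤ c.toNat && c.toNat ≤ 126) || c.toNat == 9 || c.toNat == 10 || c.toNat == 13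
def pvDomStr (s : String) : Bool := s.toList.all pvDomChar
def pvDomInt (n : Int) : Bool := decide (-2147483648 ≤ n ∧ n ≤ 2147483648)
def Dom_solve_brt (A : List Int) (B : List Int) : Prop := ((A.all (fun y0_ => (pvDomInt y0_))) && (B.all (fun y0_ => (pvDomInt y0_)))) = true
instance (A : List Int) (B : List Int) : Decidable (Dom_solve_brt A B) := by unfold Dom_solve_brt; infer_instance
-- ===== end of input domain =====

-- B sorts B once and counts, per a ∈ A, the elements of B below a with bisect_left;
-- the nested pair scan of A disappears (objective: faster).

-- ===== PORT A =====
-- for i in range(n): for j in range(m): if A[i] > B[j]: count += 1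
def solve_brt (A : List Int) (B : List Int) : Int :=
  let n := PySem.List.len A
  let m := PySem.List.len B
  let count : Int := 0
  let count := (PySem.List.pyRange 0 n).foldl (fun count i =>
    (PySem.List.pyRange 0 m).foldl (fun count j =>
      if PySem.List.pyGetD B j 0 < PySem.List.pyGetD A i 0 then count + 1 else count) count) count
  count

-- ===== PORT B =====
-- SB = sorted(B); for a in A: total += bisect_left(SB, a)   (the hand-written lo/hi
-- loop in Source B is exactly Python's bisect_left, ported as the prelude's primitive)
def solve_brt_alt (A : List Int) (B : List Int) : Int :=
  let SB := PySem.List.sorted B (fun x => x)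
  A.foldl (fun total a => total + (PySem.List.bisectLeft SB a : Int)) 0

-- ===== PRECONDITION & SPEC =====
def Spec_solve_brt (A : List Int) (B : List Int) (out : Int) : Prop := out = solve_brt_alt A B
instance (A : List Int) (B : List Int) (out : Int) : Decidable (Spec_solve_brt A B out) := by unfold Spec_solve_brt; infer_instance

-- ===== CLAIM (what is proved, stated in full; the proofs are below) =====
def Claim_equal_solve_brt : Prop := ∀ (A : List Int) (B : List Int), Dom_solve_brt A B → Spec_solve_brt A B (solve_brt A B)

-- ===== LEMMAS AND PROOFS =====

-- On a ≤-sorted list, bisect_left x is exactly the number of elements below x.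
theorem bisectLeft_eq_countP (xs : List Int) (x : Int)
    (h : List.Pairwise (· ≤ ·) xs) :
    PySem.List.bisectLeft xs x = xs.countP (· < x) := by
  obtain ⟨hle, hlt, hge⟩ := PySem.List.bisectLeft_spec xs x h
  set k := PySem.List.bisectLeft xs x with hk
  have hsplit : xs = xs.take k ++ xs.drop k := (List.take_append_drop k xs).symm
  rw [hsplit, List.countP_append]
  have h1 : (xs.take k).countP (· < x) = (xs.take k).length := by
    apply List.countP_eq_length.mpr
    intro b hb
    obtain ⟨j, hj, rfl⟩ := List.getElem_of_mem hb
    have hjk : j < k := by simp [List.length_take] at hj; omega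
    have hjx : j < xs.length := lt_of_lt_of_le hjk hle
    have := hlt j hjx hjk
    simpa [List.getElem_take] using this
  have h2 : (xs.drop k).countP (· < x) = 0 := by
    apply List.countP_eq_zero.mpr
    intro b hb
    obtain ⟨j, hj, rfl⟩ := List.getElem_of_mem hb
    have hjx : k + j < xs.length := by
      have := hj; simp [List.length_drop] at this; omega
    have := hge (k + j) hjx (by omega)
    simp only [List.getElem_drop]
    simpa using this
  rw [h1, h2, List.length_take]
  omega

-- Per-element count: bisect_left into sorted(B) counts B's elements below a.
theorem bisectLeft_sorted_eq (B : List Int) (a : Int) :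
    (PySem.List.bisectLeft (PySem.List.sorted B (fun x => x)) a : Int)
      = (B.countP (· < a) : Int) := by
  have hp : List.Pairwise (· ≤ ·) (PySem.List.sorted B (fun x => x)) :=
    PySem.List.sorted_pairwise B (fun x => x)
  rw [bisectLeft_eq_countP _ _ hp,
      (PySem.List.sorted_perm B (fun x => x) false).countP_eq]

-- A's inner loop over range(m) is the count of B's elements below A[i].
theorem inner_loop_eq (B : List Int) (a c : Int) :
    (PySem.List.pyRange 0 (PySem.List.len B)).foldl
      (fun count j => if PySem.List.pyGetD B j 0 < a then count + 1 else count) c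
      = c + (B.countP (· < a) : Int) := by
  rw [PySem.List.foldl_pyRange_pyGetD B 0 (fun count b => if b < a then count + 1 else count) c le_rfl]
  simpa using PySem.List.foldl_count_if (fun b => decide (b < a)) B c

-- Both folds over A agree, for any accumulator.
theorem folds_eq (A B : List Int) (init : Int) :
    A.foldl (fun count a =>
      (PySem.List.pyRange 0 (PySem.List.len B)).foldl
        (fun count j => if PySem.List.pyGetD B j 0 < a then count + 1 else count) count) init
    = A.foldl (fun total a =>
        total + (PySem.List.bisectLeft (PySem.List.sorted B (fun x => x)) a : Int)) init := by
  induction A generalizing init with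
  | nil => rfl
  | cons a A ih =>
      simp only [List.foldl_cons]
      rw [inner_loop_eq B a init, bisectLeft_sorted_eq B a, ih]

-- ===== VERDICT (by name: the statement is the Claim_ definition above) =====
theorem solve_brt_spec : Claim_equal_solve_brt := by
  intro A B _
  show solve_brt A B = solve_brt_alt A B
  unfold solve_brt solve_brt_alt
  dsimp only
  rw [PySem.List.foldl_pyRange_pyGetD A 0
    (fun count a =>
      (PySem.List.pyRange 0 (PySem.List.len B)).foldl
        (fun count j => if PySem.List.pyGetD B j 0 < a then count + 1 else count) count) 0 le_rfl]
  exact folds_eq A B 0
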